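-- pv_equiv track=rewrite | github.com/Escarangello/MLBWeatherPublic | streamlit_app.py | format_home_runs_display
-- ===== SOURCE A (Python) =====
-- def format_home_runs_display(home_runs, away_team_abbr, home_team_abbr):
--     """Format home run information for display as HTML."""
--     if not home_runs:
--         return "No home runs hit yet"
--
--     home_run_text = []
--     away_hrs = [hr for hr in home_runs if hr['team_type'] == 'away']
--     home_hrs = [hr for hr in home_runs if hr['team_type'] == 'home']
--
--     if away_hrs:
--         # Use fallback if abbreviation is empty
--         team_name = away_team_abbr if away_team_abbr else "Away"
--         away_text = f"<strong>{team_name}:</strong> "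
--         away_details = []
--         for hr in away_hrs:
--             detail = f"{hr['batter']} (Inning {hr['inning']})"
--             if hr['distance']:
--                 detail += f" - {hr['distance']} ft"
--             away_details.append(detail)
--         away_text += ", ".join(away_details)
--         home_run_text.append(away_text)
--
--     if home_hrs:
--         # Use fallback if abbreviation is empty
--         team_name = home_team_abbr if home_team_abbr else "Home"
--         home_text = f"<strong>{team_name}:</strong> "
--         home_details = []
--         for hr in home_hrs:
--             detail = f"{hr['batter']} (Inning {hr['inning']})"
--             if hr['distance']:
--                 detail += f" - {hr['distance']} ft"
--             home_details.append(detail)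
--         home_text += ", ".join(home_details)
--         home_run_text.append(home_text)
--
--     return " | ".join(home_run_text)
-- ===== SOURCE B (Python) =====
-- def format_home_runs_display(home_runs, away_team_abbr, home_team_abbr):
--     """Format home run information for display as HTML (single-pass dispatch)."""
--     if not home_runs:
--         return "No home runs hit yet"
--
--     away_details = []
--     home_details = []
--     for hr in home_runs:
--         t = hr['team_type']
--         if t == 'away':
--             bucket = away_details
--         elif t == 'home':
--             bucket = home_details
--         else:
--             continue
--         detail = f"{hr['batter']} (Inning {hr['inning']})"
--         if hr['distance']:
--             detail += f" - {hr['distance']} ft"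
--         bucket.append(detail)
--
--     segments = []
--     if away_details:
--         segments.append(f"<strong>{away_team_abbr or 'Away'}:</strong> " + ", ".join(away_details))
--     if home_details:
--         segments.append(f"<strong>{home_team_abbr or 'Home'}:</strong> " + ", ".join(home_details))
--     return " | ".join(segments)
-- ===== Notes on version B (the rewrite author's own statement) =====
-- stated objective: simpler
-- what changed: Replaced A's two filter-then-format passes (one per team) with a single pass that dispatches each home run's detail string into an away or home bucket, then joins the non-empty segments.
import Mathlib
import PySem

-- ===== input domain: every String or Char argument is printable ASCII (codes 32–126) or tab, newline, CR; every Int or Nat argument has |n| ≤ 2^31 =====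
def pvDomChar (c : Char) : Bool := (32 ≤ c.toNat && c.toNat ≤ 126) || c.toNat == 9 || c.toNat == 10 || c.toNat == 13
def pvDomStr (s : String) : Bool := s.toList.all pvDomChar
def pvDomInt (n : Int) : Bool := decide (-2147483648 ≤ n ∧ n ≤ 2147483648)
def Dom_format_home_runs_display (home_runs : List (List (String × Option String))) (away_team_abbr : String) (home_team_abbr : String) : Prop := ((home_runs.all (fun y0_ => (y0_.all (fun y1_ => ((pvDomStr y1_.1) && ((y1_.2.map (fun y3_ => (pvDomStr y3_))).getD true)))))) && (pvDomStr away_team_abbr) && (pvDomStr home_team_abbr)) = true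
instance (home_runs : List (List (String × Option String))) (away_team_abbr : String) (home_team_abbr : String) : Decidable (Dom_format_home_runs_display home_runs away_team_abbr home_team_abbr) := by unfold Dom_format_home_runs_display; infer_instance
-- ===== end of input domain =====

-- B replaces A's two filter-and-format passes by one dispatching pass that buckets each
-- home run's detail string into away/home lists, then joins the non-empty segments (objective: simpler).
-- Shared helpers (both Pythons render a hr dict's detail the same way):
-- Python str() of a value that is None or a string (f-string interpolation)
def pvRepr (v : Option String) : String :=
  match v with
  | none => "None"
  | some s => s

-- first-match association-list lookup = dict lookup (KeyError rendered as the "None" default;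
-- Pre_ excludes inputs where the key is missing, i.e. where Python raises)
def pvGetV (hr : List (String × Option String)) (k : String) : Option String :=
  (List.lookup k hr).getD none

-- detail = f"{hr['batter']} (Inning {hr['inning']})" [+ f" - {hr['distance']} ft" if truthy]
def fhrdDetail (hr : List (String × Option String)) : String :=
  let base := pvRepr (pvGetV hr "batter") ++ " (Inning " ++ pvRepr (pvGetV hr "inning") ++ ")"
  match pvGetV hr "distance" with
  | some s => if s = "" then base else base ++ " - " ++ s ++ " ft"
  | none => base

-- ===== PORT A =====
def format_home_runs_display (home_runs : List (List (String × Option String))) (away_team_abbr : String) (home_team_abbr : String) : String :=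
  if home_runs = [] then "No home runs hit yet"
  else
    let home_run_text : List String := []
    let away_hrs := home_runs.filter (fun hr => List.lookup "team_type" hr == some (some "away"))
    let home_hrs := home_runs.filter (fun hr => List.lookup "team_type" hr == some (some "home"))
    let home_run_text :=
      if away_hrs ≠ [] then
        let team_name := if away_team_abbr ≠ "" then away_team_abbr else "Away"
        let away_text := "<strong>" ++ team_name ++ ":</strong> "
        let away_details := away_hrs.foldl (fun acc hr => acc ++ [fhrdDetail hr]) []
        let away_text := away_text ++ PySem.Str.join ", " away_details
        home_run_text ++ [away_text]
      else home_run_text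
    let home_run_text :=
      if home_hrs ≠ [] then
        let team_name := if home_team_abbr ≠ "" then home_team_abbr else "Home"
        let home_text := "<strong>" ++ team_name ++ ":</strong> "
        let home_details := home_hrs.foldl (fun acc hr => acc ++ [fhrdDetail hr]) []
        let home_text := home_text ++ PySem.Str.join ", " home_details
        home_run_text ++ [home_text]
      else home_run_text
    PySem.Str.join " | " home_run_text

-- ===== PORT B =====
-- the single dispatching loop over home_runs, carrying (away_details, home_details)
def fhrdLoop : List (List (String × Option String)) → List String × List String → List String × List String
  | [], acc => acc
  | hr :: rest, (aw, hm) =>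
    fhrdLoop rest
      (let t := List.lookup "team_type" hr
       if t == some (some "away") then (aw ++ [fhrdDetail hr], hm)
       else if t == some (some "home") then (aw, hm ++ [fhrdDetail hr])
       else (aw, hm))

def format_home_runs_display_alt (home_runs : List (List (String × Option String))) (away_team_abbr : String) (home_team_abbr : String) : String :=
  if home_runs = [] then "No home runs hit yet"
  else
    let (aw, hm) := fhrdLoop home_runs ([], [])
    let segments :=
      (if aw ≠ [] then
        ["<strong>" ++ (if away_team_abbr = "" then "Away" else away_team_abbr) ++ ":</strong> " ++ PySem.Str.join ", " aw]
       else []) ++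
      (if hm ≠ [] then
        ["<strong>" ++ (if home_team_abbr = "" then "Home" else home_team_abbr) ++ ":</strong> " ++ PySem.Str.join ", " hm]
       else [])
    PySem.Str.join " | " segments

-- ===== PRECONDITION & SPEC =====
-- Pre_ excludes exactly the inputs where Python A raises KeyError: a hr without a 'team_type'
-- key, or an away/home hr missing 'batter', 'inning' or 'distance'.
def Pre_format_home_runs_display (home_runs : List (List (String × Option String))) (away_team_abbr : String) (home_team_abbr : String) : Prop :=
  ∀ hr ∈ home_runs,
    (List.lookup "team_type" hr).isSome = true ∧
    ((List.lookup "team_type" hr = some (some "away") ∨ List.lookup "team_type" hr = some (some "home")) →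
      (List.lookup "batter" hr).isSome = true ∧ (List.lookup "inning" hr).isSome = true ∧
      (List.lookup "distance" hr).isSome = true)
instance (home_runs : List (List (String × Option String))) (away_team_abbr : String) (home_team_abbr : String) : Decidable (Pre_format_home_runs_display home_runs away_team_abbr home_team_abbr) := by unfold Pre_format_home_runs_display; infer_instance

def pvWitness_format_home_runs_display : (List (List (String × Option String))) × String × String :=
  ([[("team_type", some "away"), ("batter", some "Judge"), ("inning", some "3"), ("distance", some "410")]], "NYY", "BOS")

def Spec_format_home_runs_display (home_runs : List (List (String × Option String))) (away_team_abbr : String) (home_team_abbr : String) (out : String) : Prop := out = format_home_runs_display_alt home_runs away_team_abbr home_team_abbr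
instance (home_runs : List (List (String × Option String))) (away_team_abbr : String) (home_team_abbr : String) (out : String) : Decidable (Spec_format_home_runs_display home_runs away_team_abbr home_team_abbr out) := by unfold Spec_format_home_runs_display; infer_instance

-- ===== CLAIM (what is proved, stated in full; the proofs are below) =====
def Claim_equal_format_home_runs_display : Prop := ∀ (home_runs : List (List (String × Option String))) (away_team_abbr : String) (home_team_abbr : String), Dom_format_home_runs_display home_runs away_team_abbr home_team_abbr → Pre_format_home_runs_display home_runs away_team_abbr home_team_abbr → Spec_format_home_runs_display home_runs away_team_abbr home_team_abbr (format_home_runs_display home_runs away_team_abbr home_team_abbr)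

-- ===== LEMMAS AND PROOFS =====

-- B's single loop computes exactly A's two filtered-and-mapped detail lists
theorem fhrdLoop_eq (hrs : List (List (String × Option String))) (aw hm : List String) :
    fhrdLoop hrs (aw, hm) =
      (aw ++ (hrs.filter (fun hr => List.lookup "team_type" hr == some (some "away"))).map fhrdDetail,
       hm ++ (hrs.filter (fun hr => List.lookup "team_type" hr == some (some "home"))).map fhrdDetail) := by
  induction hrs generalizing aw hm with
  | nil => simp [fhrdLoop]
  | cons hr rest ih =>
    simp only [fhrdLoop, List.filter_cons]
    by_cases h1 : List.lookup "team_type" hr == some (some "away")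
    · have h2 : ¬ (List.lookup "team_type" hr == some (some "home")) := by
        simp only [beq_iff_eq] at h1 ⊢; simp [h1]
      simp [h1, h2, ih]
    · by_cases h2 : List.lookup "team_type" hr == some (some "home")
      · simp [h1, h2, ih]
      · simp [h1, h2, ih]

-- ===== VERDICT (by name: the statement is the Claim_ definition above) =====
theorem format_home_runs_display_spec : Claim_equal_format_home_runs_display := by
  intro hrs a h _ _
  unfold Spec_format_home_runs_display format_home_runs_display format_home_runs_display_alt
  by_cases hnil : hrs = []
  · simp [hnil]
  · simp only [hnil, if_false, if_neg hnil]
    rw [fhrdLoop_eq]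
    simp only [List.nil_append, PySem.List.foldl_append_singleton_eq_map, List.nil_append]
    by_cases ha : (hrs.filter (fun hr => List.lookup "team_type" hr == some (some "away"))) = [] <;>
    by_cases hh : (hrs.filter (fun hr => List.lookup "team_type" hr == some (some "home"))) = [] <;>
    by_cases ha' : a = "" <;>
    by_cases hh' : h = "" <;>
    simp [ha, hh, ha', hh']
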